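-- pv_equiv track=rewrite | github.com/beatrizaf/theHuxley-python | 2509.py | calcular_leds
-- ===== SOURCE A (Python) =====
-- def calcular_leds(digito):
--      cont = 0
--      for i in range(len(digito)):
--          if digito[i] == "1":
--              cont += 2
--          elif digito[i] == "2" or digito[i] == "3" or digito[i] == "5":
--              cont += 5
--          elif digito[i] == "4":
--              cont += 4
--          elif digito[i] == "6" or digito[i] == "9" or digito[i] == "0":
--              cont += 6
--          elif digito[i] == "7":
--              cont += 3
--          elif digito[i] == "8":
--              cont += 7
--      return cont
-- ===== SOURCE B (Python) =====
-- def calcular_leds(digito):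
--     segments = {"0": 6, "1": 2, "2": 5, "3": 5, "4": 4, "5": 5, "6": 6, "7": 3, "8": 7, "9": 6}
--     count = {}
--     for ch in digito:
--         count[ch] = count.get(ch, 0) + 1
--     return sum(count.get(d, 0) * s for d, s in segments.items())
-- ===== Notes on version B (the rewrite author's own statement) =====
-- stated objective: faster
-- what changed: Replaces the per-character if/elif chain with a frequency table built in one pass plus a single multiply-and-sum over the fixed 10-entry digit-to-segments mapping; unknown characters contribute 0 because only the mapping's keys are summed.
import Mathlib
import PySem

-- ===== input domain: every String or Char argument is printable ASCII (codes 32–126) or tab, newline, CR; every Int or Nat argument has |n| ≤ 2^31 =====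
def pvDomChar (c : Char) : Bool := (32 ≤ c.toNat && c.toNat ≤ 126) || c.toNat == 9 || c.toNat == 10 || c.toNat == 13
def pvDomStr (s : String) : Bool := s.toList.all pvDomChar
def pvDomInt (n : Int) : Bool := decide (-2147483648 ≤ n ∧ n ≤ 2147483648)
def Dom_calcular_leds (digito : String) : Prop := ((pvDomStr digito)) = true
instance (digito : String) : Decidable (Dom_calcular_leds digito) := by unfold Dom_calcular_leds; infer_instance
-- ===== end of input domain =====

-- B replaces A's per-character if/elif chain by a frequency count plus one sum over a fixed digit→segments table (measured faster by a constant factor).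

-- ===== PORT A =====
def calcular_leds (digito : String) : Int :=
  (PySem.List.pyRange 0 (digito.toList.length : Int) 1).foldl
    (fun cont i =>
      match PySem.List.pyGet? digito.toList i with
      | none => cont   -- unreachable: i ∈ range(len(digito))
      | some c =>
        if c = '1' then cont + 2
        else if c = '2' ∨ c = '3' ∨ c = '5' then cont + 5
        else if c = '4' then cont + 4
        else if c = '6' ∨ c = '9' ∨ c = '0' then cont + 6
        else if c = '7' then cont + 3
        else if c = '8' then cont + 7
        else cont) 0

-- ===== PORT B =====
-- the fixed digit→segments mapping (dict literal in Source B)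
def segTable : List (Char × Int) :=
  [('0', 6), ('1', 2), ('2', 5), ('3', 5), ('4', 4), ('5', 5), ('6', 6), ('7', 3), ('8', 7), ('9', 6)]

def calcular_leds_alt (digito : String) : Int :=
  let count : PySem.Dict Char Int :=
    digito.toList.foldl (fun d ch => d.insert ch (d.getD ch 0 + 1)) PySem.Dict.empty
  segTable.foldl (fun acc p => acc + count.getD p.1 0 * p.2) 0

-- ===== PRECONDITION & SPEC =====
def Spec_calcular_leds (digito : String) (out : Int) : Prop := out = calcular_leds_alt digito
instance (digito : String) (out : Int) : Decidable (Spec_calcular_leds digito out) := by unfold Spec_calcular_leds; infer_instance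

-- ===== CLAIM (what is proved, stated in full; the proofs are below) =====
def Claim_equal_calcular_leds : Prop := ∀ (digito : String), Dom_calcular_leds digito → Spec_calcular_leds digito (calcular_leds digito)

-- ===== LEMMAS AND PROOFS =====

-- segment count of one character (A's if/elif chain as a function)
def seg (c : Char) : Int :=
  if c = '1' then 2
  else if c = '2' ∨ c = '3' ∨ c = '5' then 5
  else if c = '4' then 4
  else if c = '6' ∨ c = '9' ∨ c = '0' then 6
  else if c = '7' then 3
  else if c = '8' then 7
  else 0

theorem calcular_leds_eq_sum (digito : String) :
    calcular_leds digito = (digito.toList.map seg).sum := by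
  have hcong :
      List.foldl
        (fun (cont : Int) (i : Int) =>
          match PySem.List.pyGet? digito.toList i with
          | none => cont
          | some c =>
            if c = '1' then cont + 2
            else if c = '2' ∨ c = '3' ∨ c = '5' then cont + 5
            else if c = '4' then cont + 4
            else if c = '6' ∨ c = '9' ∨ c = '0' then cont + 6
            else if c = '7' then cont + 3
            else if c = '8' then cont + 7
            else cont)
        0 (PySem.List.pyRange 0 (digito.toList.length : Int) 1)
      = List.foldl
          (fun (cont : Int) (i : Int) => cont + seg (PySem.List.pyGetD digito.toList i (' ')))
          0 (PySem.List.pyRange 0 (digito.toList.length : Int) 1) := by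
    apply PySem.List.foldl_congr_mem
    intro cont i hi
    have hmem := (PySem.List.mem_pyRange_one).1 hi
    have h0 : 0 ≤ i := hmem.1
    have hlt : i < (digito.toList.length : Int) := hmem.2
    rw [PySem.List.pyGet?_eq_some_getElem _ h0 hlt,
      PySem.List.pyGetD_eq_getElem _ _ h0 hlt]
    dsimp only
    simp only [seg]
    split_ifs <;> omega
  unfold calcular_leds
  rw [hcong]
  rw [PySem.List.foldl_pyRange_zero_pyGetD' digito.toList (' ')
      (fun acc c => acc + seg c) 0]
  rw [PySem.List.foldl_add]
  simp

theorem extra (c : Char) (l : List Char) :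
    (segTable.map fun p => (((c :: l).count p.1 : Int)) * p.2).sum
    = (segTable.map fun p => ((l.count p.1 : Int)) * p.2).sum + seg c := by
  simp only [segTable, List.map_cons, List.map_nil, List.sum_cons, List.sum_nil,
    List.count_cons]
  push_cast
  by_cases h0 : c = '0'
  · subst h0; simp [seg]; ring
  by_cases h1 : c = '1'
  · subst h1; simp [seg]; ring
  by_cases h2 : c = '2'
  · subst h2; simp [seg]; ring
  by_cases h3 : c = '3'
  · subst h3; simp [seg]; ring
  by_cases h4 : c = '4'
  · subst h4; simp [seg]; ring
  by_cases h5 : c = '5'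
  · subst h5; simp [seg]; ring
  by_cases h6 : c = '6'
  · subst h6; simp [seg]; ring
  by_cases h7 : c = '7'
  · subst h7; simp [seg]; ring
  by_cases h8 : c = '8'
  · subst h8; simp [seg]; ring
  by_cases h9 : c = '9'
  · subst h9; simp [seg]; ring
  simp [seg, h0, h1, h2, h3, h4, h5, h6, h7, h8, h9]

theorem calcular_leds_alt_eq_sum (digito : String) :
    calcular_leds_alt digito = (digito.toList.map seg).sum := by
  have h : calcular_leds_alt digito
      = segTable.foldl
          (fun acc p => acc + (PySem.Dict.counter digito.toList).getD p.1 0 * p.2) 0 := by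
    unfold calcular_leds_alt
    rw [PySem.Dict.foldl_insert_getD_add_one_eq_counter]
  rw [h, PySem.List.foldl_add
    (g := fun p : Char × Int => (PySem.Dict.counter digito.toList).getD p.1 0 * p.2)]
  simp only [PySem.Dict.getD_counter, zero_add]
  induction digito.toList with
  | nil => simp [segTable]
  | cons c l ih =>
    rw [extra, ih, List.map_cons, List.sum_cons]
    ring

-- ===== VERDICT (by name: the statement is the Claim_ definition above) =====
theorem calcular_leds_spec : Claim_equal_calcular_leds := by
  intro digito _
  unfold Spec_calcular_leds
  rw [calcular_leds_eq_sum, calcular_leds_alt_eq_sum]
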